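-- pv_equiv track=rewrite | github.com/Justrussiaprogrammer/Meanders_counting_and_drawing | Meanders/functions.py | meander_to_matrix
-- ===== SOURCE A (Python) =====
-- def meander_to_matrix(meander):
--     n = len(meander)
--     matrix = list()
--     for i in range(n):
--         matrix.append([0] * n)
--
--     meander_string = ''.join([str(x) for x in meander])
--     for i in range(n):
--         for j in range(i + 1, n):
--             if meander[i] > meander[j]:
--                 matrix[i][j] = 1
--                 matrix[j][i] = 1
--     return matrix
-- ===== SOURCE B (Python) =====
-- def meander_to_matrix(meander):
--     # Incremental construction: grow the matrix one element at a time.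
--     # For each new element x, compare it against the prefix seen so far to get its
--     # border column, append one entry to every existing row, and add the new row.
--     mat = []
--     prefix = []
--     for x in meander:
--         col = [1 if y > x else 0 for y in prefix]
--         for row, c in zip(mat, col):
--             row.append(c)
--         mat.append(col + [0])
--         prefix.append(x)
--     return mat
-- ===== Notes on version B (the rewrite author's own statement) =====
-- stated objective: alternative
-- what changed: Replaces A's preallocated matrix with a nested upper-triangle index loop and mirrored symmetric writes by an incremental single pass that grows the matrix one element at a time: each new element's comparison column against the prefix is appended to every existing row and becomes the new bordering row; also drops the dead meander_string line.
import Mathlib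
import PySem

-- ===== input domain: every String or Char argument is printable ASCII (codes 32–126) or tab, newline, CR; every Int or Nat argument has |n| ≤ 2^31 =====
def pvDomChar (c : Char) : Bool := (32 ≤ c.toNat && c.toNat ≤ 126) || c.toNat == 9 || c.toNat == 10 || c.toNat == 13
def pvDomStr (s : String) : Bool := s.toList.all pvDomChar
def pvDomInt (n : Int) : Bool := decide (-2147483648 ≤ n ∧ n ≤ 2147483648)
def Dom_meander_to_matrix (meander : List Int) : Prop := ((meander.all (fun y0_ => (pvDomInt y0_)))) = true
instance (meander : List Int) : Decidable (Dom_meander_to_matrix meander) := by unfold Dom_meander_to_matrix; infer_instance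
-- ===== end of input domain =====

-- B replaces A's upper-triangle double index loop with mirrored symmetric writes by an
-- incremental single pass that grows the matrix one element (one border row/column) at a
-- time (objective: alternative; same O(n^2) cost).

-- ===== PORT A =====
-- body of the inner loop: 'if meander[i] > meander[j]: matrix[i][j] = 1; matrix[j][i] = 1'
def pvStepA (m : List Int) (mat : List (List Int)) (i j : Nat) : List (List Int) :=
  if m.getD i 0 > m.getD j 0 then
    let mat1 := mat.set i ((mat.getD i []).set j 1)
    mat1.set j ((mat1.getD j []).set i 1)
  else mat

def meander_to_matrix (meander : List Int) : List (List Int) :=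
  let n := meander.length
  -- 'for i in range(n): matrix.append([0]*n)'
  let matrix := (List.range n).map (fun _ => List.replicate n (0 : Int))
  -- the 'meander_string' line of A is dead code (pure, unused): omitted
  (List.range n).foldl (fun mat i =>
    -- 'for j in range(i+1, n):'
    (List.range' (i + 1) (n - (i + 1))).foldl (fun mat j => pvStepA meander mat i j) mat)
    matrix

-- ===== PORT B =====
-- one iteration of B's loop body: state is (mat, prefix)
def pvStepB (st : List (List Int) × List Int) (x : Int) : List (List Int) × List Int :=
  let col := st.2.map (fun y => if y > x then (1 : Int) else 0)
  let mat' := (st.1.zip col).map (fun rc => rc.1 ++ [rc.2])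
  (mat' ++ [col ++ [0]], st.2 ++ [x])

def meander_to_matrix_alt (meander : List Int) : List (List Int) :=
  (meander.foldl pvStepB ([], [])).1

-- ===== PRECONDITION & SPEC =====
def Spec_meander_to_matrix (meander : List Int) (out : List (List Int)) : Prop := out = meander_to_matrix_alt meander
instance (meander : List Int) (out : List (List Int)) : Decidable (Spec_meander_to_matrix meander out) := by unfold Spec_meander_to_matrix; infer_instance

-- ===== CLAIM (what is proved, stated in full; the proofs are below) =====
def Claim_equal_meander_to_matrix : Prop := ∀ (meander : List Int), Dom_meander_to_matrix meander → Spec_meander_to_matrix meander (meander_to_matrix meander)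

-- ===== LEMMAS AND PROOFS =====

-- the per-cell specification matrix both programs are proved equal to
def pvMat (p : List Int) : List (List Int) :=
  (List.range p.length).map (fun a => (List.range p.length).map (fun b =>
    if (p.getD a 0 - p.getD b 0) * ((a : Int) - (b : Int)) < 0 then (1 : Int) else 0))

theorem getD_set_self' {α : Type} (l : List α) (i : Nat) (h : i < l.length) (v d : α) :
    (l.set i v).getD i d = v := by
  simp [List.getD_eq_getElem?_getD, h]

theorem getD_set_ne' {α : Type} (l : List α) (i j : Nat) (h : i ≠ j) (v : α) (d : α) :
    (l.set i v).getD j d = l.getD j d := by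
  simp [List.getD_eq_getElem?_getD, h]

-- the (a,b) entry of a matrix, as A reads/writes it
def pvEntry (mat : List (List Int)) (a b : Nat) : Int := (mat.getD a []).getD b 0

-- shape predicate: n rows, each of length n
def pvShape (n : Nat) (mat : List (List Int)) : Prop :=
  mat.length = n ∧ ∀ row ∈ mat, row.length = n

theorem pvShape_getD (n a : Nat) (mat : List (List Int)) (h : pvShape n mat) (ha : a < n) :
    (mat.getD a []).length = n := by
  obtain ⟨hl, hr⟩ := h
  have hal : a < mat.length := by omega
  exact hr _ (List.getD_eq_getElem _ _ hal ▸ List.getElem_mem hal)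

theorem pvShape_set (n i : Nat) (mat : List (List Int)) (row : List Int)
    (h : pvShape n mat) (hrow : row.length = n) : pvShape n (mat.set i row) := by
  obtain ⟨hl, hr⟩ := h
  refine ⟨by simp [hl], ?_⟩
  intro r hr'
  rcases List.mem_or_eq_of_mem_set hr' with h1 | h1
  · exact hr _ h1
  · subst h1; exact hrow

theorem pvShape_step (m : List Int) (n i j : Nat) (mat : List (List Int))
    (h : pvShape n mat) (hi : i < n) (hj : j < n) :
    pvShape n (pvStepA m mat i j) := by
  unfold pvStepA
  split
  · have h1 : pvShape n (mat.set i ((mat.getD i []).set j 1)) :=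
      pvShape_set n i mat _ h (by rw [List.length_set]; exact pvShape_getD n i mat h hi)
    exact pvShape_set n j _ _ h1 (by rw [List.length_set]; exact pvShape_getD n j _ h1 hj)
  · exact h

-- entry after one step
theorem pvEntry_step (m : List Int) (n i j a b : Nat) (mat : List (List Int))
    (hsh : pvShape n mat) (hij : i ≠ j) (hi : i < n) (hj : j < n) (ha : a < n) (hb : b < n) :
    pvEntry (pvStepA m mat i j) a b =
      if ((i = a ∧ j = b) ∨ (i = b ∧ j = a)) ∧ m.getD i 0 > m.getD j 0 then 1
      else pvEntry mat a b := by
  have hl := hsh.1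
  have hrowi : (mat.getD i []).length = n := pvShape_getD n i mat hsh hi
  have hrowj : (mat.getD j []).length = n := pvShape_getD n j mat hsh hj
  unfold pvStepA pvEntry
  by_cases hc : m.getD i 0 > m.getD j 0
  · rw [if_pos hc]
    have hgetj : (mat.set i ((mat.getD i []).set j 1)).getD j [] = mat.getD j [] :=
      getD_set_ne' _ i j hij _ _
    simp only [hgetj]
    by_cases haj : a = j
    · subst haj
      rw [getD_set_self' _ a (by simp; omega) _ _]
      by_cases hbi : b = i
      · subst hbi
        rw [getD_set_self' _ b (by omega) _ _]
        rw [if_pos ⟨Or.inr ⟨rfl, rfl⟩, hc⟩]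
      · rw [getD_set_ne' _ i b (fun h => hbi h.symm) _ _]
        rw [if_neg]
        rintro ⟨(⟨h1, h2⟩ | ⟨h1, h2⟩), -⟩ <;> omega
    · rw [getD_set_ne' _ j a (fun h => haj h.symm) _ _]
      by_cases hai : a = i
      · subst hai
        rw [getD_set_self' _ a (by omega) _ _]
        by_cases hbj : b = j
        · subst hbj
          rw [getD_set_self' _ b (by omega) _ _]
          rw [if_pos ⟨Or.inl ⟨rfl, rfl⟩, hc⟩]
        · rw [getD_set_ne' _ j b (fun h => hbj h.symm) _ _]
          rw [if_neg]
          rintro ⟨(⟨h1, h2⟩ | ⟨h1, h2⟩), -⟩ <;> omega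
      · rw [getD_set_ne' _ i a (fun h => hai h.symm) _ _]
        rw [if_neg]
        rintro ⟨(⟨h1, h2⟩ | ⟨h1, h2⟩), -⟩ <;> omega
  · rw [if_neg hc, if_neg]
    rintro ⟨-, h'⟩
    exact hc h'

theorem pvShape_fold (m : List Int) (n : Nat) (P : List (Nat × Nat)) (mat : List (List Int))
    (hsh : pvShape n mat) (hP : ∀ p ∈ P, p.1 < p.2 ∧ p.2 < n) :
    pvShape n (P.foldl (fun mat p => pvStepA m mat p.1 p.2) mat) := by
  induction P generalizing mat with
  | nil => exact hsh
  | cons p P ih =>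
    obtain ⟨hp1, hp2⟩ := hP p (by simp)
    exact ih _ (pvShape_step m n p.1 p.2 mat hsh (by omega) hp2)
      (fun q hq => hP q (by simp [hq]))

-- folding the step over any list of admissible pairs: entry characterization
theorem pvEntry_fold (m : List Int) (n a b : Nat) (P : List (Nat × Nat))
    (mat : List (List Int)) (hsh : pvShape n mat)
    (hP : ∀ p ∈ P, p.1 < p.2 ∧ p.2 < n) (ha : a < n) (hb : b < n) :
    pvEntry (P.foldl (fun mat p => pvStepA m mat p.1 p.2) mat) a b =
      if (∃ p ∈ P, ((p.1 = a ∧ p.2 = b) ∨ (p.1 = b ∧ p.2 = a)) ∧ m.getD p.1 0 > m.getD p.2 0)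
      then 1 else pvEntry mat a b := by
  induction P generalizing mat with
  | nil => simp
  | cons p P ih =>
    obtain ⟨hp1, hp2⟩ := hP p (by simp)
    have hsh' : pvShape n (pvStepA m mat p.1 p.2) :=
      pvShape_step m n p.1 p.2 mat hsh (by omega) hp2
    rw [List.foldl_cons, ih _ hsh' (fun q hq => hP q (by simp [hq]))]
    rw [pvEntry_step m n p.1 p.2 a b mat hsh (by omega) (by omega) hp2 ha hb]
    by_cases hEx : ∃ q ∈ P, ((q.1 = a ∧ q.2 = b) ∨ (q.1 = b ∧ q.2 = a)) ∧ m.getD q.1 0 > m.getD q.2 0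
    · have hEx' : ∃ q ∈ p :: P, ((q.1 = a ∧ q.2 = b) ∨ (q.1 = b ∧ q.2 = a)) ∧ m.getD q.1 0 > m.getD q.2 0 := by
        obtain ⟨q, hq, hq2⟩ := hEx; exact ⟨q, by simp [hq], hq2⟩
      rw [if_pos hEx, if_pos hEx']
    · rw [if_neg hEx]
      by_cases hHead : ((p.1 = a ∧ p.2 = b) ∨ (p.1 = b ∧ p.2 = a)) ∧ m.getD p.1 0 > m.getD p.2 0
      · have hEx' : ∃ q ∈ p :: P, ((q.1 = a ∧ q.2 = b) ∨ (q.1 = b ∧ q.2 = a)) ∧ m.getD q.1 0 > m.getD q.2 0 :=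
          ⟨p, by simp, hHead⟩
        rw [if_pos hHead, if_pos hEx']
      · have hEx' : ¬ ∃ q ∈ p :: P, ((q.1 = a ∧ q.2 = b) ∨ (q.1 = b ∧ q.2 = a)) ∧ m.getD q.1 0 > m.getD q.2 0 := by
          rintro ⟨q, hq, hq2⟩
          rcases List.mem_cons.mp hq with h | h
          · exact hHead (h ▸ hq2)
          · exact hEx ⟨q, h, hq2⟩
        rw [if_neg hHead, if_neg hEx']

-- the pair list A's nested loops traverse
def pvPairs (n : Nat) : List (Nat × Nat) :=
  (List.range n).flatMap (fun i => (List.range' (i + 1) (n - (i + 1))).map (fun j => (i, j)))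

theorem mem_pvPairs (n i j : Nat) : (i, j) ∈ pvPairs n ↔ i < j ∧ j < n := by
  unfold pvPairs
  simp only [List.mem_flatMap, List.mem_map, List.mem_range, List.mem_range'_1]
  constructor
  · rintro ⟨i', hi', j', hj', heq⟩
    obtain ⟨h1, h2⟩ := Prod.mk.injEq .. ▸ heq
    subst h1; subst h2; omega
  · rintro ⟨h1, h2⟩
    exact ⟨i, by omega, j, ⟨by omega, by omega⟩, rfl⟩

-- nested foldl = foldl over the flattened pair list
theorem nested_foldl_eq (m : List Int) (n : Nat) (is : List Nat) (mat : List (List Int)) :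
    is.foldl (fun mat i =>
        (List.range' (i + 1) (n - (i + 1))).foldl (fun mat j => pvStepA m mat i j) mat) mat =
      (is.flatMap (fun i => (List.range' (i + 1) (n - (i + 1))).map (fun j => (i, j)))).foldl
        (fun mat p => pvStepA m mat p.1 p.2) mat := by
  induction is generalizing mat with
  | nil => simp
  | cons i is ih =>
    simp only [List.foldl_cons, List.flatMap_cons, List.foldl_append, List.foldl_map]
    exact ih _

theorem pvShape_zero (n : Nat) :
    pvShape n ((List.range n).map (fun _ => List.replicate n (0 : Int))) := by
  constructor
  · simp
  · intro row hrow
    simp only [List.mem_map] at hrow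
    obtain ⟨_, _, h⟩ := hrow
    simp [← h]

theorem pvPairs_bounds (n : Nat) : ∀ p ∈ pvPairs n, p.1 < p.2 ∧ p.2 < n := by
  rintro ⟨i, j⟩ hp
  exact (mem_pvPairs n i j).mp hp

theorem meander_to_matrix_shape (m : List Int) :
    pvShape m.length (meander_to_matrix m) := by
  unfold meander_to_matrix
  rw [nested_foldl_eq m m.length (List.range m.length)]
  exact pvShape_fold m m.length _ _ (pvShape_zero m.length) (pvPairs_bounds m.length)

-- A's matrix, cell by cell
theorem meander_to_matrix_entry (m : List Int) (a b : Nat)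
    (ha : a < m.length) (hb : b < m.length) :
    pvEntry (meander_to_matrix m) a b =
      if (m.getD a 0 - m.getD b 0) * ((a : Int) - (b : Int)) < 0 then 1 else 0 := by
  unfold meander_to_matrix
  rw [nested_foldl_eq m m.length (List.range m.length)]
  rw [show (List.range m.length).flatMap
      (fun i => (List.range' (i + 1) (m.length - (i + 1))).map (fun j => (i, j))) =
      pvPairs m.length from rfl]
  rw [pvEntry_fold m m.length a b (pvPairs m.length) _ (pvShape_zero m.length)
    (pvPairs_bounds m.length) ha hb]
  have hzero : pvEntry ((List.range m.length).map (fun _ => List.replicate m.length (0 : Int))) a b = 0 := by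
    have h1 : ((List.range m.length).map (fun _ => List.replicate m.length (0 : Int))).getD a []
        = List.replicate m.length 0 := by
      rw [List.getD_eq_getElem _ _ (by simpa using ha)]
      simp
    unfold pvEntry
    rw [h1]
    simp [List.getD_eq_getElem?_getD, hb]
  rw [hzero]
  congr 1
  have hiff : (∃ p ∈ pvPairs m.length, ((p.1 = a ∧ p.2 = b) ∨ (p.1 = b ∧ p.2 = a)) ∧ m.getD p.1 0 > m.getD p.2 0)
      ↔ (m.getD a 0 - m.getD b 0) * ((a : Int) - (b : Int)) < 0 := by
    constructor
    · rintro ⟨⟨i, j⟩, hmem, htouch, hlt⟩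
      obtain ⟨hij, _⟩ := (mem_pvPairs m.length i j).mp hmem
      simp only at htouch hlt
      rcases htouch with ⟨h1, h2⟩ | ⟨h1, h2⟩
      · subst h1; subst h2
        apply mul_neg_of_pos_of_neg
        · omega
        · omega
      · subst h1; subst h2
        apply mul_neg_of_neg_of_pos
        · omega
        · omega
    · intro hmul
      rcases mul_neg_iff.mp hmul with ⟨h1, h2⟩ | ⟨h1, h2⟩
      · have hab : a < b := by omega
        exact ⟨(a, b), (mem_pvPairs m.length a b).mpr ⟨hab, hb⟩, Or.inl ⟨rfl, rfl⟩, show m.getD a 0 > m.getD b 0 by omega⟩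
      · have hba : b < a := by omega
        exact ⟨(b, a), (mem_pvPairs m.length b a).mpr ⟨hba, ha⟩, Or.inr ⟨rfl, rfl⟩, show m.getD b 0 > m.getD a 0 by omega⟩
  simp only [hiff]

-- A equals the per-cell specification matrix
theorem meander_to_matrix_eq_pvMat (m : List Int) :
    meander_to_matrix m = pvMat m := by
  have hsh := meander_to_matrix_shape m
  unfold pvMat
  apply List.ext_getElem
  · simp [hsh.1]
  · intro a h1 h2
    have ha : a < m.length := by simpa [hsh.1] using h1
    apply List.ext_getElem
    · have := hsh.2 _ (List.getElem_mem h1)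
      simp [this]
    · intro b hb1 hb2
      have hb : b < m.length := by
        have := hsh.2 _ (List.getElem_mem h1)
        omega
      have hA : (meander_to_matrix m)[a][b] = pvEntry (meander_to_matrix m) a b := by
        unfold pvEntry
        rw [List.getD_eq_getElem _ _ (by omega : a < (meander_to_matrix m).length)]
        rw [List.getD_eq_getElem _ _ (by omega)]
      rw [hA, meander_to_matrix_entry m a b ha hb]
      simp [List.getElem_map, List.getElem_range]

-- B-side: one incremental step carries the spec matrix of the prefix to the spec matrix of prefix ++ [x]
theorem pvStepB_pvMat (p : List Int) (x : Int) :
    pvStepB (pvMat p, p) x = (pvMat (p ++ [x]), p ++ [x]) := by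
  have hcol : p.map (fun y => if y > x then (1 : Int) else 0)
      = (List.range p.length).map (fun a => if p.getD a 0 > x then (1 : Int) else 0) := by
    apply List.ext_getElem
    · simp
    · intro i h1 h2
      simp only [List.getElem_map, List.getElem_range]
      rw [List.getD_eq_getElem _ _ (by simpa using h1)]
  unfold pvStepB pvMat
  simp only []
  refine Prod.ext ?_ rfl
  simp only
  rw [hcol, List.zip_map', List.map_map]
  have hlen : (p ++ [x]).length = p.length + 1 := by simp
  rw [hlen, List.range_succ, List.map_append]
  congr 1
  · -- existing rows, each extended by one border entry
    apply List.map_congr_left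
    intro a hmem
    have ha : a < p.length := List.mem_range.mp hmem
    simp only [Function.comp]
    rw [List.map_append]
    congr 1
    · apply List.map_congr_left
      intro b hb
      have hb' : b < p.length := List.mem_range.mp hb
      rw [List.getD_append _ _ _ _ (by omega), List.getD_append _ _ _ _ (by omega)]
    · simp only [List.map_cons, List.map_nil]
      congr 1
      rw [List.getD_append _ _ _ _ (by omega)]
      have hx : (p ++ [x]).getD p.length 0 = x := by
        rw [List.getD_eq_getElem _ _ (by simp)]
        simp
      rw [hx]
      have hneg : ((a : Int) - (p.length : Int)) < 0 := by
        have := ha; omega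
      by_cases hgt : p.getD a 0 > x
      · rw [if_pos hgt, if_pos]
        apply mul_neg_of_pos_of_neg
        · omega
        · exact hneg
      · rw [if_neg hgt, if_neg]
        intro hmul
        rcases mul_neg_iff.mp hmul with ⟨h1, h2⟩ | ⟨h1, h2⟩
        · omega
        · omega
  · -- the new bordering row
    simp only [List.map_cons, List.map_nil]
    congr 1
    rw [List.map_append]
    congr 1
    · apply List.map_congr_left
      intro b hb
      have hb' : b < p.length := List.mem_range.mp hb
      have hx : (p ++ [x]).getD p.length 0 = x := by
        rw [List.getD_eq_getElem _ _ (by simp)]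
        simp
      rw [hx, List.getD_append _ _ _ _ (by omega)]
      have hpos : (0 : Int) < (p.length : Int) - (b : Int) := by
        have := hb'; omega
      by_cases hgt : p.getD b 0 > x
      · rw [if_pos hgt, if_pos]
        apply mul_neg_of_neg_of_pos
        · omega
        · exact hpos
      · rw [if_neg hgt, if_neg]
        intro hmul
        rcases mul_neg_iff.mp hmul with ⟨h1, h2⟩ | ⟨h1, h2⟩
        · omega
        · omega
    · simp

-- B's fold invariant
theorem pvFoldB (m p : List Int) :
    m.foldl pvStepB (pvMat p, p) = (pvMat (p ++ m), p ++ m) := by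
  induction m generalizing p with
  | nil => simp
  | cons x rest ih =>
    rw [List.foldl_cons, pvStepB_pvMat, ih (p ++ [x])]
    simp

-- B equals the per-cell specification matrix
theorem meander_to_matrix_alt_eq_pvMat (m : List Int) :
    meander_to_matrix_alt m = pvMat m := by
  unfold meander_to_matrix_alt
  have h0 : (([] : List (List Int)), ([] : List Int)) = (pvMat [], ([] : List Int)) := by
    simp [pvMat]
  rw [h0, pvFoldB m []]
  simp

-- ===== VERDICT (by name: the statement is the Claim_ definition above) =====
theorem meander_to_matrix_spec : Claim_equal_meander_to_matrix := by
  intro m _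
  unfold Spec_meander_to_matrix
  rw [meander_to_matrix_eq_pvMat, meander_to_matrix_alt_eq_pvMat]
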